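-- pv_equiv track=rewrite | github.com/Dimkashow/SampleText | BotFunc/Pavel.py | check_name
-- ===== SOURCE A (Python) =====
-- def alpha_in(str):
--     for i in str:
--         if i.isalpha():
--             return 1
--     return 0
--
-- def check_name(txt: str, maxim=20, flag=0):
--     if flag and txt == '-':
--         return 1
--     if not txt[0].isupper() or txt[0] in ' -':
--         return 0
--     if not 1 <= len(txt) <= maxim:
--         return 0
--     for i in range(1, len(txt)):
--         if not txt[i].isalpha() and txt[i] not in '- ':
--             return 0
--
--     check = 0
--     indexes = (txt.find(' '), txt.find('-'))
--     for i in range(2):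
--         if indexes[i] == -1:
--             check += 2
--         else:
--             check += alpha_in(txt[:indexes[i]])
--             check += alpha_in(txt[indexes[i] + 1:])
--
--     return 0 if check != 4 else 1
-- ===== SOURCE B (Python) =====
-- def check_name(txt: str, maxim=20, flag=0):
--     if flag and txt == '-':
--         return 1
--     if not txt[0].isupper():
--         return 0
--     if len(txt) > maxim:
--         return 0
--     seen_space = seen_hyphen = ok_space = ok_hyphen = False
--     for c in txt[1:]:
--         if c == ' ':
--             seen_space = True
--         elif c == '-':
--             seen_hyphen = True
--         elif c.isalpha():
--             ok_space = ok_space or seen_space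
--             ok_hyphen = ok_hyphen or seen_hyphen
--         else:
--             return 0
--     return 1 if (ok_space or not seen_space) and (ok_hyphen or not seen_hyphen) else 0
-- ===== Notes on version B (the rewrite author's own statement) =====
-- stated objective: alternative
-- what changed: Replaced A's multi-scan check (validity loop, then two find() calls with alpha_in over prefix/suffix slices summed into a numeric accumulator) by a single left-to-right pass over txt[1:] maintaining four Boolean flags (seen-space/seen-hyphen, alpha-after-space/alpha-after-hyphen), and dropped the redundant alpha_in-on-prefix and txt[0]-in-' -' checks since txt[0] must already be uppercase.
import Mathlib
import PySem

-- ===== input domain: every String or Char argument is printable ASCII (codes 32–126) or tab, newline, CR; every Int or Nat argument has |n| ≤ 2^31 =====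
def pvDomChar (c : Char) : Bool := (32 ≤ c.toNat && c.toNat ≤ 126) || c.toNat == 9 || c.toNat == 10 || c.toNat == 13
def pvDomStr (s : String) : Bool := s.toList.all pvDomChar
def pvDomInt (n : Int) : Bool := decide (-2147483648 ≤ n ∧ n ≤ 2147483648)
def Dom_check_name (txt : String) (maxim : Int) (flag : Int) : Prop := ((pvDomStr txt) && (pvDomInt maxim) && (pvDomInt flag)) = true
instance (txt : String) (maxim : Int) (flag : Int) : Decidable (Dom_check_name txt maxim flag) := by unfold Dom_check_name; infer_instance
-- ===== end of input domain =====

-- B replaces A's find()+slice multi-scan validation by one left-to-right pass with four Boolean flags; alternative decomposition, same asymptotic cost.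

-- ===== PORT A =====
-- helper alpha_in: first-alpha early-return loop
def alphaIn : List Char → Int
  | [] => 0
  | c :: r => if PySem.Chars.isalpha c then 1 else alphaIn r

-- the 'for i in range(1, len(txt)): if not alpha and not in "- ": return 0' loop (over txt[1:])
def validLoop : List Char → Bool
  | [] => true
  | c :: r => if !PySem.Chars.isalpha c && !(c = '-' || c = ' ') then false else validLoop r

-- one iteration of A's 'for i in range(2)' over indexes = (txt.find(' '), txt.find('-'))
def sepSummand (cs : List Char) (x : Char) : Int :=
  if PySem.Chars.find cs [x] = -1 then 2
  else
    alphaIn (PySem.List.slice cs none (some (PySem.Chars.find cs [x]))) +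
    alphaIn (PySem.List.slice cs (some (PySem.Chars.find cs [x] + 1)) none)

-- everything after the successful txt[0] lookup
def check_name_body (txt : String) (maxim : Int) (c0 : Char) : Int :=
  if ¬ (PySem.Chars.isupper c0 = true) ∨ (c0 = ' ' ∨ c0 = '-') then 0
  else if ¬ (1 ≤ PySem.Str.len txt ∧ PySem.Str.len txt ≤ maxim) then 0
  else if validLoop txt.toList.tail = false then 0
  else if sepSummand txt.toList ' ' + sepSummand txt.toList '-' ≠ 4 then 0 else 1

def check_name (txt : String) (maxim : Int) (flag : Int) : Int :=
  if flag ≠ 0 ∧ txt = "-" then 1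
  else
    match PySem.Str.pyGet? txt 0 with
    | none => 0  -- IndexError on txt[0]: excluded by Pre_check_name
    | some c0 => check_name_body txt maxim c0

-- ===== PORT B =====
-- single pass over txt[1:] with four flags (seen-space, seen-hyphen, alpha-after-space, alpha-after-hyphen)
def altLoop : List Char → Bool → Bool → Bool → Bool → Int
  | [], ss, sh, os, oh => if ((os || !ss) && (oh || !sh)) = true then 1 else 0
  | c :: r, ss, sh, os, oh =>
    if c = ' ' then altLoop r true sh os oh
    else if c = '-' then altLoop r ss true os oh
    else if PySem.Chars.isalpha c = true then altLoop r ss sh (os || ss) (oh || sh)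
    else 0

def check_name_alt_body (txt : String) (maxim : Int) (c0 : Char) : Int :=
  if ¬ (PySem.Chars.isupper c0 = true) then 0
  else if maxim < PySem.Str.len txt then 0
  else altLoop txt.toList.tail false false false false

def check_name_alt (txt : String) (maxim : Int) (flag : Int) : Int :=
  if flag ≠ 0 ∧ txt = "-" then 1
  else
    match PySem.Str.pyGet? txt 0 with
    | none => 0  -- IndexError on txt[0]: excluded by Pre_check_name
    | some c0 => check_name_alt_body txt maxim c0

-- ===== PRECONDITION & SPEC =====
-- Pre_ excludes only txt = "", where both A and B raise IndexError on txt[0].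
def Pre_check_name (txt : String) (maxim : Int) (flag : Int) : Prop := txt ≠ ""
instance (txt : String) (maxim : Int) (flag : Int) : Decidable (Pre_check_name txt maxim flag) := by unfold Pre_check_name; infer_instance
def pvWitness_check_name : String × Int × Int := ("Anna-Lee", 20, 0)
def Spec_check_name (txt : String) (maxim : Int) (flag : Int) (out : Int) : Prop := out = check_name_alt txt maxim flag
instance (txt : String) (maxim : Int) (flag : Int) (out : Int) : Decidable (Spec_check_name txt maxim flag out) := by unfold Spec_check_name; infer_instance

-- ===== CLAIM (what is proved, stated in full; the proofs are below) =====
def Claim_equal_check_name : Prop := ∀ (txt : String) (maxim : Int) (flag : Int), Dom_check_name txt maxim flag → Pre_check_name txt maxim flag → Spec_check_name txt maxim flag (check_name txt maxim flag)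

-- ===== LEMMAS AND PROOFS =====

-- "is there an alpha strictly after the FIRST occurrence of x" (false if x absent)
def afterFst (x : Char) : List Char → Bool
  | [] => false
  | c :: r => if c = x then r.any (fun d => PySem.Chars.isalpha d) else afterFst x r

-- the value A's summand takes, as a function of membership / afterFst
def summandVal (x : Char) (t : List Char) : Int :=
  if x ∈ t then (if afterFst x t then 2 else 1) else 2

-- flag condition one separator contributes to B's final test
def sepOk (x : Char) (seen ok : Bool) (t : List Char) : Bool :=
  (ok || (if seen then t.any (fun d => PySem.Chars.isalpha d) else afterFst x t)) || !(seen || t.contains x)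

theorem isupper_facts (c : Char) (h : PySem.Chars.isupper c = true) :
    PySem.Chars.isalpha c = true ∧ c ≠ ' ' ∧ c ≠ '-' := by
  refine ⟨by simp [PySem.Chars.isalpha, h], ?_, ?_⟩ <;>
    · rintro rfl; simp [PySem.Chars.isupper] at h

theorem alphaIn_eq (l : List Char) :
    alphaIn l = if l.any (fun d => PySem.Chars.isalpha d) then 1 else 0 := by
  induction l with
  | nil => simp [alphaIn]
  | cons c r ih => by_cases h : PySem.Chars.isalpha c = true <;> simp [alphaIn, h, ih]

theorem singleton_prefix_iff (x : Char) (l : List Char) : [x] <+: l ↔ l.head? = some x := by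
  cases l with
  | nil => simp
  | cons c r =>
    constructor
    · rintro ⟨t, ht⟩; cases ht; simp
    · intro h; simp at h; exact ⟨r, by simp [h]⟩

theorem singleton_infix_iff (x : Char) (l : List Char) : [x] <:+: l ↔ x ∈ l := by
  constructor
  · intro h; simpa using h.sublist
  · intro h
    obtain ⟨s, t, rfl⟩ := List.append_of_mem h
    exact ⟨s, t, by simp⟩

theorem afterFst_of_first (x : Char) (t : List Char) (m : Nat)
    (hgetm : t[m]? = some x) (hminm : ∀ j < m, t[j]? ≠ some x) :
    (t.drop (m + 1)).any (fun d => PySem.Chars.isalpha d) = afterFst x t := by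
  induction t generalizing m with
  | nil => simp at hgetm
  | cons c r ih =>
    by_cases hcx : c = x
    · have hm0 : m = 0 := by
        by_contra h0'
        exact hminm 0 (by omega) (by simp [hcx])
      subst hm0; simp [afterFst, hcx]
    · obtain ⟨m', rfl⟩ : ∃ m', m = m' + 1 := by
        cases m with
        | zero => simp at hgetm; exact absurd hgetm hcx
        | succ m' => exact ⟨m', rfl⟩
      simp only [List.drop_succ_cons, afterFst, if_neg hcx]
      exact ih m' (by simpa using hgetm) (fun j hj => hminm (j + 1) (by omega) ∘ by simp)

-- value of one summand of A's check, for a first char that is alpha and not the separator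
theorem summand_eq (x c0 : Char) (t : List Char)
    (hne : c0 ≠ x) (ha : PySem.Chars.isalpha c0 = true) :
    sepSummand (c0 :: t) x = summandVal x t := by
  unfold sepSummand summandVal
  by_cases hm : x ∈ t
  · have hmem : x ∈ c0 :: t := List.mem_cons_of_mem _ hm
    have hfind : PySem.Chars.find (c0 :: t) [x] ≠ -1 := by
      rw [PySem.Chars.find_ne_neg_one_iff, singleton_infix_iff]; exact hmem
    have h0 : 0 ≤ PySem.Chars.find (c0 :: t) [x] := by
      have := PySem.Chars.neg_one_le_find (s := c0 :: t) (sub := [x]); omega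
    set i := PySem.Chars.find (c0 :: t) [x] with hi
    obtain ⟨hpre, hmin⟩ := PySem.Chars.find_spec (s := c0 :: t) (sub := [x]) h0
    have hget : (c0 :: t)[i.toNat]? = some x := by
      rw [← List.head?_drop]; exact (singleton_prefix_iff _ _).1 hpre
    have hklt : i.toNat < (c0 :: t).length := by
      by_contra hc; rw [List.getElem?_eq_none (by omega)] at hget; simp at hget
    have hk1 : 1 ≤ i.toNat := by
      rcases Nat.eq_zero_or_pos i.toNat with h | h
      · rw [h] at hget; simp at hget; exact absurd hget hne
      · exact h
    have hslice1 : PySem.List.slice (c0 :: t) none (some i) = (c0 :: t).take i.toNat :=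
      PySem.List.slice_to _ h0
    have hslice2 : PySem.List.slice (c0 :: t) (some (i + 1)) none = (c0 :: t).drop (i + 1).toNat :=
      PySem.List.slice_from _ (by omega)
    have htake : alphaIn ((c0 :: t).take i.toNat) = 1 := by
      obtain ⟨k, hk⟩ : ∃ k, i.toNat = k + 1 := ⟨i.toNat - 1, by omega⟩
      rw [hk]; simp [List.take_succ_cons, alphaIn_eq, ha]
    have hdrop : ((c0 :: t).drop (i + 1).toNat).any (fun d => PySem.Chars.isalpha d) = afterFst x t := by
      have htk : (i + 1).toNat = i.toNat + 1 := by omega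
      rw [htk]
      simp only [List.drop_succ_cons]
      obtain ⟨m, hm'⟩ : ∃ m, i.toNat = m + 1 := ⟨i.toNat - 1, by omega⟩
      have hgetm : t[m]? = some x := by
        rw [hm'] at hget; simpa using hget
      have hminm : ∀ j < m, t[j]? ≠ some x := by
        intro j hj hcon
        have := hmin (j + 1) (by omega)
        rw [singleton_prefix_iff, List.head?_drop] at this
        simp only [List.getElem?_cons_succ] at this
        exact this hcon
      rw [hm']
      exact afterFst_of_first x t m hgetm hminm
    rw [if_neg hfind, hslice1, hslice2, htake, if_pos hm, alphaIn_eq, hdrop]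
    cases afterFst x t <;> simp
  · have hfind : PySem.Chars.find (c0 :: t) [x] = -1 := by
      rw [PySem.Chars.find_eq_neg_one_iff, singleton_infix_iff]
      intro hc
      rcases List.mem_cons.1 hc with h | h
      · exact hne h.symm
      · exact hm h
    rw [if_pos hfind, if_neg hm]

theorem summand_cases (x : Char) (t : List Char) : summandVal x t = 1 ∨ summandVal x t = 2 := by
  unfold summandVal; split_ifs <;> simp

theorem summandVal_iff (x : Char) (t : List Char) :
    summandVal x t = 2 ↔ sepOk x false false t = true := by
  unfold summandVal sepOk
  by_cases hx : x ∈ t <;> by_cases haf : afterFst x t = true <;> simp [hx, haf]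

theorem altLoop_invalid (t : List Char) (ss sh os oh : Bool) (h : validLoop t = false) :
    altLoop t ss sh os oh = 0 := by
  induction t generalizing ss sh os oh with
  | nil => simp [validLoop] at h
  | cons c r ih =>
    by_cases h1 : c = ' '
    · subst h1; simp [validLoop] at h; simp [altLoop, ih _ _ _ _ h]
    · by_cases h2 : c = '-'
      · subst h2; simp [validLoop] at h; simp [altLoop, h1, ih _ _ _ _ h]
      · by_cases h3 : PySem.Chars.isalpha c = true
        · simp [validLoop, h1, h2, h3] at h; simp [altLoop, h1, h2, h3, ih _ _ _ _ h]
        · simp [altLoop, h1, h2, h3]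

theorem altLoop_spec (t : List Char) (ss sh os oh : Bool) (h : validLoop t = true) :
    altLoop t ss sh os oh =
      if (sepOk ' ' ss os t && sepOk '-' sh oh t) = true then 1 else 0 := by
  induction t generalizing ss sh os oh with
  | nil => simp [altLoop, sepOk, afterFst]
  | cons c r ih =>
    by_cases h1 : c = ' '
    · subst h1
      simp [validLoop] at h
      rw [altLoop, if_pos rfl, ih _ _ _ _ h]
      have hs : sepOk ' ' ss os (' ' :: r) = sepOk ' ' true os r := by
        cases ss <;> simp [sepOk, afterFst, PySem.Chars.isalpha, PySem.Chars.isupper, PySem.Chars.islower]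
      have hh : sepOk '-' sh oh (' ' :: r) = sepOk '-' sh oh r := by
        cases sh <;> simp [sepOk, afterFst, PySem.Chars.isalpha, PySem.Chars.isupper, PySem.Chars.islower]
      rw [hs, hh]
    · by_cases h2 : c = '-'
      · subst h2
        simp [validLoop] at h
        rw [altLoop, if_neg h1, if_pos rfl, ih _ _ _ _ h]
        have hs : sepOk ' ' ss os ('-' :: r) = sepOk ' ' ss os r := by
          cases ss <;> simp [sepOk, afterFst, PySem.Chars.isalpha, PySem.Chars.isupper, PySem.Chars.islower]
        have hh : sepOk '-' sh oh ('-' :: r) = sepOk '-' true oh r := by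
          cases sh <;> simp [sepOk, afterFst, PySem.Chars.isalpha, PySem.Chars.isupper, PySem.Chars.islower]
        rw [hs, hh]
      · by_cases h3 : PySem.Chars.isalpha c = true
        · simp only [validLoop, h1, h2, h3] at h
          simp only [Bool.not_true, Bool.false_and, Bool.or_self] at h
          rw [altLoop, if_neg h1, if_neg h2, if_pos h3]
          rw [ih _ _ _ _ (by simpa [validLoop, h1, h2, h3] using h)]
          have h1' : ((' ' : Char) = c) = False := eq_false (fun h => h1 h.symm)
          have h2' : (('-' : Char) = c) = False := eq_false (fun h => h2 h.symm)
          have hs : sepOk ' ' ss os (c :: r) = sepOk ' ' ss (os || ss) r := by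
            cases ss <;> cases os <;> simp [sepOk, afterFst, h1, h3, h1']
          have hh : sepOk '-' sh oh (c :: r) = sepOk '-' sh (oh || sh) r := by
            cases sh <;> cases oh <;> simp [sepOk, afterFst, h2, h3, h2']
          rw [hs, hh]
        · simp [validLoop, h1, h2, h3] at h

-- ===== VERDICT (by name: the statement is the Claim_ definition above) =====
theorem check_name_spec : Claim_equal_check_name := by
  intro txt maxim flag _ hpre
  unfold Spec_check_name check_name check_name_alt
  by_cases hf : flag ≠ 0 ∧ txt = "-"
  · rw [if_pos hf, if_pos hf]
  · rw [if_neg hf, if_neg hf]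
    have hne : txt.toList ≠ [] := by
      intro h; exact hpre (by simpa using congrArg String.ofList h)
    obtain ⟨c0, t, hl⟩ : ∃ c0 t, txt.toList = c0 :: t := by
      cases h : txt.toList with
      | nil => exact absurd h hne
      | cons a b => exact ⟨a, b, rfl⟩
    have hget : PySem.Str.pyGet? txt 0 = some c0 := by
      have h0 : PySem.Str.pyGet? txt 0 = PySem.List.pyGet? txt.toList 0 := by
        simp [PySem.Str.pyGet?]
      rw [h0, hl, PySem.List.pyGet?_zero_cons]
    rw [hget]
    show check_name_body txt maxim c0 = check_name_alt_body txt maxim c0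
    unfold check_name_body check_name_alt_body
    by_cases hu : PySem.Chars.isupper c0 = true
    · obtain ⟨ha, hsp, hhy⟩ := isupper_facts c0 hu
      rw [if_neg (show ¬ (¬ (PySem.Chars.isupper c0 = true) ∨ (c0 = ' ' ∨ c0 = '-')) from by
            simp [hu, hsp, hhy]),
          if_neg (not_not_intro hu)]
      have hn : PySem.Str.len txt = (txt.toList.length : Int) := by simp [PySem.Str.len_eq]
      have h1len : (1 : Int) ≤ PySem.Str.len txt := by
        rw [hn, hl, List.length_cons]; omega
      by_cases hmx : maxim < PySem.Str.len txt
      · rw [if_pos (show ¬ (1 ≤ PySem.Str.len txt ∧ PySem.Str.len txt ≤ maxim) from by omega),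
            if_pos hmx]
      · rw [if_neg (show ¬ ¬ (1 ≤ PySem.Str.len txt ∧ PySem.Str.len txt ≤ maxim) from
              not_not_intro ⟨h1len, by omega⟩),
            if_neg hmx]
        have htail : txt.toList.tail = t := by rw [hl]; rfl
        by_cases hv : validLoop t = true
        · rw [htail, if_neg (by simp [hv]), altLoop_spec _ _ _ _ _ hv]
          rw [hl, summand_eq ' ' c0 t hsp ha, summand_eq '-' c0 t hhy ha]
          have r1 := summandVal_iff ' ' t
          have r2 := summandVal_iff '-' t
          rcases summand_cases ' ' t with h1v | h1v <;>
            rcases summand_cases '-' t with h2v | h2v <;>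
            rw [h1v, h2v]
          · have b1 : sepOk ' ' false false t = false := by
              cases hb : sepOk ' ' false false t
              · rfl
              · rw [r1.2 hb] at h1v; omega
            norm_num [b1]
          · have b1 : sepOk ' ' false false t = false := by
              cases hb : sepOk ' ' false false t
              · rfl
              · rw [r1.2 hb] at h1v; omega
            norm_num [b1]
          · have b2 : sepOk '-' false false t = false := by
              cases hb : sepOk '-' false false t
              · rfl
              · rw [r2.2 hb] at h2v; omega
            norm_num [b2]
          · rw [r1] at h1v; rw [r2] at h2v
            norm_num [h1v, h2v]
        · have hv' : validLoop t = false := by simpa using hv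
          rw [htail, if_pos hv', altLoop_invalid _ _ _ _ _ hv']
    · rw [if_pos (show (¬ (PySem.Chars.isupper c0 = true) ∨ (c0 = ' ' ∨ c0 = '-')) from Or.inl hu),
          if_pos hu]
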